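-- pv_equiv track=rewrite | github.com/Andrei-98/k8s-thesis | kube-test.py | split_multiple_outputs
-- ===== SOURCE A (Python) =====
-- def split_multiple_outputs(bin_us, job_comp, sched_del):
--     res_bin   = []
--     while 'Bin[us]' in bin_us:
--
--         # res_bin += [{**this part**},(first_find), ...]
--         res_bin.append(bin_us[:bin_us.index('Bin[us]')])
--
--         # bin_us = [...(first_find),{**this part**}]
--         bin_us = bin_us[bin_us.index('Bin[us]')+1:]
--
--     res_bin.append(bin_us)
--
--
--     res_job   = []
--     while 'Job_comp_time' in job_comp:
--         #job_comp = job_comp.split('Job_comp_time')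
--
--         # res_job += [{**this part**},(first_find), ...]
--         res_job.append(job_comp[:job_comp.index('Job_comp_time')])
--
--         # job_comp = [...(first_find),{**this part**}]
--         job_comp = job_comp[job_comp.index('Job_comp_time')+1:]
--
--     res_job.append(job_comp)
--
--
--     res_delay = []
--     while 'sched_delay' in sched_del:
--         #sched_del = sched_del.split('sched_delay')
--
--         # res_delay += [{**this part**},(first_find), ...]
--         res_delay.append(sched_del[:sched_del.index('sched_delay')])
--
--         # sched_del = [...(first_find),{**this part**}]
--         sched_del = sched_del[sched_del.index('sched_delay')+1:]
--
--     res_delay.append(sched_del)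
--
--     return res_bin, res_job, res_delay
-- ===== SOURCE B (Python) =====
-- def split_multiple_outputs(bin_us, job_comp, sched_del):
--     def split_on(xs, sep):
--         res, cur = [], []
--         for x in xs:
--             if x == sep:
--                 res.append(cur)
--                 cur = []
--             else:
--                 cur.append(x)
--         res.append(cur)
--         return res
--     return (split_on(bin_us, 'Bin[us]'),
--             split_on(job_comp, 'Job_comp_time'),
--             split_on(sched_del, 'sched_delay'))
-- ===== Notes on version B (the rewrite author's own statement) =====
-- stated objective: alternative
-- what changed: replaces the repeated 'in'-test + list.index + double slicing of the shrinking remainder with a single left-to-right pass per list that accumulates the current segment and flushes it at each sentinel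
import Mathlib
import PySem

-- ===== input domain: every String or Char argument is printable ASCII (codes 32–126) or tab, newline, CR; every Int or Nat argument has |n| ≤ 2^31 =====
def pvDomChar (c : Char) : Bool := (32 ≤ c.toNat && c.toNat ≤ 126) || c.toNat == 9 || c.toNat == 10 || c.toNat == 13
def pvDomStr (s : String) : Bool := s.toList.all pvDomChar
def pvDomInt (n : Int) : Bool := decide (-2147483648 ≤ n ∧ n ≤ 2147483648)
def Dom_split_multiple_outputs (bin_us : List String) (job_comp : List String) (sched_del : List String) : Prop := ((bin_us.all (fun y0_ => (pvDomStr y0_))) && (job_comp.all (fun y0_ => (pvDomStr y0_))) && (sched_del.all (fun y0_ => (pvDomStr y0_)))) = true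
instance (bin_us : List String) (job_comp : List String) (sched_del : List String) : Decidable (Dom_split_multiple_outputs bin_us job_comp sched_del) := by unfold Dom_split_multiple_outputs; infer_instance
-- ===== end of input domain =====

-- B replaces A's repeated 'in'-test + list.index + double slicing of the shrinking remainder with
-- one left-to-right pass per list that accumulates the current segment and flushes it at each
-- sentinel (objective: alternative algorithm, same observable result).

-- ===== PORT A =====
-- A's while loop: while sep in xs: append xs[:xs.index(sep)]; xs = xs[xs.index(sep)+1:];
-- finally append xs.  ('sep in xs' ↔ index? = some; the two .index calls compute the same i.)
def pvASplitOn (sep : String) (xs : List String) : List (List String) :=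
  match h : PySem.List.index? xs sep with
  | some i =>
      PySem.List.slice xs (some 0) (some (i : Int)) ::
        pvASplitOn sep (PySem.List.slice xs (some ((i : Int) + 1)) none)
  | none => [xs]
termination_by xs.length
decreasing_by
  obtain ⟨hk, -, -⟩ := PySem.List.getElem_of_index?_eq_some h
  have e : ((i : Int) + 1) = (((i + 1 : Nat)) : Int) := by push_cast; ring
  rw [e, PySem.List.slice_from_natCast]
  simp only [List.length_drop]
  omega

def split_multiple_outputs (bin_us : List String) (job_comp : List String) (sched_del : List String) : List (List String) × List (List String) × List (List String) :=
  (pvASplitOn "Bin[us]" bin_us, pvASplitOn "Job_comp_time" job_comp, pvASplitOn "sched_delay" sched_del)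

-- ===== PORT B =====
-- B's single pass: fold carrying (finished segments, current segment), then flush the last segment.
def pvBSplitOn (sep : String) (xs : List String) : List (List String) :=
  let p := xs.foldl
    (fun (st : List (List String) × List String) x =>
      if x == sep then (st.1 ++ [st.2], ([] : List String)) else (st.1, st.2 ++ [x]))
    ([], [])
  p.1 ++ [p.2]

def split_multiple_outputs_alt (bin_us : List String) (job_comp : List String) (sched_del : List String) : List (List String) × List (List String) × List (List String) :=
  (pvBSplitOn "Bin[us]" bin_us, pvBSplitOn "Job_comp_time" job_comp, pvBSplitOn "sched_delay" sched_del)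

-- ===== PRECONDITION & SPEC =====
def Spec_split_multiple_outputs (bin_us : List String) (job_comp : List String) (sched_del : List String) (out : List (List String) × List (List String) × List (List String)) : Prop := out = split_multiple_outputs_alt bin_us job_comp sched_del
instance (bin_us : List String) (job_comp : List String) (sched_del : List String) (out : List (List String) × List (List String) × List (List String)) : Decidable (Spec_split_multiple_outputs bin_us job_comp sched_del out) := by unfold Spec_split_multiple_outputs; infer_instance

-- ===== CLAIM (what is proved, stated in full; the proofs are below) =====
def Claim_equal_split_multiple_outputs : Prop := ∀ (bin_us : List String) (job_comp : List String) (sched_del : List String), Dom_split_multiple_outputs bin_us job_comp sched_del → Spec_split_multiple_outputs bin_us job_comp sched_del (split_multiple_outputs bin_us job_comp sched_del)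

-- ===== LEMMAS AND PROOFS =====

-- reference splitter: segments between occurrences of sep, current segment accumulated in cur
def pvSegSplit (sep : String) (cur : List String) : List String → List (List String)
  | [] => [cur]
  | x :: xs => if x = sep then cur :: pvSegSplit sep [] xs else pvSegSplit sep (cur ++ [x]) xs

theorem pvSegSplit_not_mem (sep : String) (cur : List String) (xs : List String)
    (h : sep ∉ xs) : pvSegSplit sep cur xs = [cur ++ xs] := by
  induction xs generalizing cur with
  | nil => simp [pvSegSplit]
  | cons x xs ih =>
      simp only [List.mem_cons, not_or] at h
      simp [pvSegSplit, Ne.symm h.1, ih _ h.2]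

theorem pvSegSplit_append (sep : String) (cur pre suf : List String)
    (h : sep ∉ pre) : pvSegSplit sep cur (pre ++ sep :: suf) = (cur ++ pre) :: pvSegSplit sep [] suf := by
  induction pre generalizing cur with
  | nil => simp [pvSegSplit]
  | cons x pre ih =>
      simp only [List.mem_cons, not_or] at h
      simp [pvSegSplit, Ne.symm h.1, ih _ h.2]

theorem pvASplitOn_eq (sep : String) (xs : List String) :
    pvASplitOn sep xs = pvSegSplit sep [] xs := by
  induction hn : xs.length using Nat.strong_induction_on generalizing xs with
  | _ n ih =>
  rw [pvASplitOn]
  split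
  · rename_i i hi
    rw [PySem.List.index?_eq_some_iff] at hi
    obtain ⟨pre, suf, hx, hlen, hmem⟩ := hi
    have h1 : PySem.List.slice xs (some 0) (some (i : Int)) = pre := by
      simp only [PySem.List.slice_zero_start, PySem.List.slice_to_natCast]
      rw [hx, ← hlen, List.take_left]
    have h2 : PySem.List.slice xs (some ((i : Int) + 1)) none = suf := by
      have e : ((i : Int) + 1) = (((i + 1 : Nat)) : Int) := by push_cast; ring
      rw [e, PySem.List.slice_from_natCast, hx, ← hlen,
        show pre ++ sep :: suf = (pre ++ [sep]) ++ suf by simp,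
        List.drop_left' (by simp)]
    have hlt : suf.length < n := by
      subst hn; rw [hx]; simp; omega
    rw [h1, h2, ih suf.length hlt suf rfl, hx,
        pvSegSplit_append sep [] pre suf hmem]
    simp
  · rename_i hi
    rw [PySem.List.index?_eq_none_iff] at hi
    rw [pvSegSplit_not_mem sep [] xs hi]
    simp

theorem pvBSplitOn_inv (sep : String) (xs : List String) (res : List (List String)) (cur : List String) :
    (xs.foldl
      (fun (st : List (List String) × List String) x =>
        if x == sep then (st.1 ++ [st.2], ([] : List String)) else (st.1, st.2 ++ [x]))
      (res, cur)).1 ++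
      [(xs.foldl
        (fun (st : List (List String) × List String) x =>
          if x == sep then (st.1 ++ [st.2], ([] : List String)) else (st.1, st.2 ++ [x]))
        (res, cur)).2] = res ++ pvSegSplit sep cur xs := by
  induction xs generalizing res cur with
  | nil => simp [pvSegSplit]
  | cons x xs ih =>
      simp only [List.foldl_cons]
      by_cases hx : x = sep
      · rw [if_pos (show (x == sep) = true from by simp [hx]), ih]
        simp [pvSegSplit, hx]
      · rw [if_neg (show ¬ (x == sep) = true from by simp [hx]), ih]
        simp [pvSegSplit, hx]

theorem pvBSplitOn_eq (sep : String) (xs : List String) :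
    pvBSplitOn sep xs = pvSegSplit sep [] xs := by
  simpa [pvBSplitOn] using pvBSplitOn_inv sep xs [] []

theorem pvSplitOn_eq (sep : String) (xs : List String) :
    pvASplitOn sep xs = pvBSplitOn sep xs := by
  rw [pvASplitOn_eq, pvBSplitOn_eq]

-- ===== VERDICT (by name: the statement is the Claim_ definition above) =====
theorem split_multiple_outputs_spec : Claim_equal_split_multiple_outputs := by
  intro bin_us job_comp sched_del _
  unfold Spec_split_multiple_outputs split_multiple_outputs split_multiple_outputs_alt
  rw [pvSplitOn_eq, pvSplitOn_eq, pvSplitOn_eq]
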